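-- pv_equiv track=rewrite | github.com/lodre/Pakulnevitch_Kostia | 2021-11/bin_arr.py | root0
-- ===== SOURCE A (Python) =====
-- def root0(a):
--     l = 0
--     r = len(a)-1
--     for i in range(1000000):
--         d = (l+r)//2
--         if a[d]>0:
--             r = d
--         else:
--             l = d
--     return l
-- ===== SOURCE B (Python) =====
-- def root0(a):
--     def go(l, r):
--         if r - l <= 1:
--             return l
--         m = l + (r - l) // 2
--         if a[m] > 0:
--             return go(l, m)
--         return go(m, r)
--     return go(0, len(a) - 1)
-- ===== Notes on version B (the rewrite author's own statement) =====
-- stated objective: faster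
-- what changed: B is a recursive divide-and-conquer bisection that stops as soon as the bracket has converged (r - l <= 1) and computes the midpoint as l + (r - l)//2, replacing A's fixed million-iteration imperative loop; after convergence A's remaining iterations never change l, so the results coincide.
import Mathlib
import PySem

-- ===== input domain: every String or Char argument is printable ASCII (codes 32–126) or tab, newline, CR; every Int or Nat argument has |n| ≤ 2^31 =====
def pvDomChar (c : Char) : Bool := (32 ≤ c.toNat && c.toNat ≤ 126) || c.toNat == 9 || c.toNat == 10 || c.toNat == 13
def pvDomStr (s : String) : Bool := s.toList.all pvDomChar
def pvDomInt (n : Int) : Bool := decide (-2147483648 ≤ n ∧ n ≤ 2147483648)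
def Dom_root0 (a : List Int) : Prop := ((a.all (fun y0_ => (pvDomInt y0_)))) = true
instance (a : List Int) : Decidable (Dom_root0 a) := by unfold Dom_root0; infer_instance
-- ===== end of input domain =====

-- B replaces A's fixed million-iteration imperative loop by a recursive divide-and-conquer
-- bisection that stops once the bracket has converged (r - l <= 1); same return value
-- wherever A returns.

-- ===== PORT A =====
-- one iteration of A's loop body on the state (l, r); a[d] ported as pyGetD a d 0
-- (under Pre_root0 the index d is always in range, so the default is never used)
def root0Step (a : List Int) (s : Int × Int) : Int × Int :=
  let d := PySem.Int.floordiv (s.1 + s.2) 2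
  if PySem.List.pyGetD a d 0 > 0 then (s.1, d) else (d, s.2)

-- 'return l': take the first component of the final loop state
def root0Ret (s : Int × Int) : Int := s.1

def root0 (a : List Int) : Int :=
  root0Ret ((List.range 1000000).foldl (fun s _ => root0Step a s) (0, (a.length : Int) - 1))

-- ===== PORT B =====
-- B's recursive helper go(l, r): converged bracket returns l, else recurse on a half
def root0Go (a : List Int) (l r : Int) : Int :=
  if _h : r - l ≤ 1 then l
  else
    let m := l + PySem.Int.floordiv (r - l) 2
    if PySem.List.pyGetD a m 0 > 0 then root0Go a l m else root0Go a m r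
termination_by (r - l).toNat
decreasing_by
  · have h2 : PySem.Int.floordiv (r - l) 2 = (r - l) / 2 :=
      PySem.Int.floordiv_eq_ediv_of_pos (by omega)
    simp only [h2]; omega
  · have h2 : PySem.Int.floordiv (r - l) 2 = (r - l) / 2 :=
      PySem.Int.floordiv_eq_ediv_of_pos (by omega)
    simp only [h2]; omega

def root0_alt (a : List Int) : Int :=
  root0Go a 0 ((a.length : Int) - 1)

-- ===== PRECONDITION & SPEC =====
-- Pre_ excludes the empty list, on which A raises IndexError (a[-1] on an empty list).
-- The length bound is needed only because A runs exactly 1000000 bisection steps: on a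
-- (physically impossible) list longer than 2^1000000 elements A could stop before the
-- bracket converges; we bound the length by 2^63 so the condition stays cheaply decidable.
def Pre_root0 (a : List Int) : Prop := a ≠ [] ∧ a.length ≤ 9223372036854775808
instance (a : List Int) : Decidable (Pre_root0 a) := by unfold Pre_root0; infer_instance

def pvWitness_root0 : List Int := [-3, -1, 2, 5]

def Spec_root0 (a : List Int) (out : Int) : Prop := out = root0_alt a
instance (a : List Int) (out : Int) : Decidable (Spec_root0 a out) := by unfold Spec_root0; infer_instance

-- ===== CLAIM (what is proved, stated in full; the proofs are below) =====
def Claim_equal_root0 : Prop := ∀ (a : List Int), Dom_root0 a → Pre_root0 a → Spec_root0 a (root0 a)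

-- ===== LEMMAS AND PROOFS =====

-- folding a constant-in-the-element function is iteration
theorem foldl_const_iterate {α β : Type} (f : α → α) (xs : List β) (s : α) :
    xs.foldl (fun t _ => f t) s = f^[xs.length] s := by
  induction xs generalizing s with
  | nil => rfl
  | cons x xs ih => simp [List.foldl_cons, ih, Function.iterate_succ_apply]

-- once the bracket has converged (l ≤ r ≤ l + 1), every further A-step keeps the state's
-- first component equal to l (and keeps the bracket converged)
theorem iterate_step_converged (a : List Int) (m : Nat) :
    ∀ l r : Int, l ≤ r → r ≤ l + 1 → root0Ret ((root0Step a)^[m] (l, r)) = l := by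
  induction m with
  | zero => intro l r _ _; rfl
  | succ m ih =>
    intro l r h1 h2
    rw [Function.iterate_succ_apply]
    have hd : PySem.Int.floordiv (l + r) 2 = l := by
      have h2' : PySem.Int.floordiv (l + r) 2 = (l + r) / 2 :=
        PySem.Int.floordiv_eq_ediv_of_pos (by omega)
      omega
    unfold root0Step
    simp only [hd]
    split
    · exact ih l l le_rfl (by omega)
    · exact ih l r h1 h2

-- main lemma: if r - l ≤ 2^m, then m + k A-steps land on B's answer
theorem iterate_step_eq_go (a : List Int) (m : Nat) :
    ∀ (k : Nat) (l r : Int), l ≤ r → r - l ≤ 2 ^ m →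
      root0Ret ((root0Step a)^[m + k] (l, r)) = root0Go a l r := by
  induction m with
  | zero =>
    intro k l r h1 h2
    rw [root0Go]
    simp only [show r - l ≤ 1 by omega, dite_true, Nat.zero_add]
    exact iterate_step_converged a k l r h1 (by omega)
  | succ m ih =>
    intro k l r h1 h2
    by_cases hc : r - l ≤ 1
    · rw [root0Go]
      simp only [hc, dite_true]
      exact iterate_step_converged a (m + 1 + k) l r h1 (by omega)
    · have hdA : PySem.Int.floordiv (l + r) 2 = (l + r) / 2 :=
        PySem.Int.floordiv_eq_ediv_of_pos (by omega)
      have hdB : PySem.Int.floordiv (r - l) 2 = (r - l) / 2 :=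
        PySem.Int.floordiv_eq_ediv_of_pos (by omega)
      -- B's midpoint equals A's midpoint
      have hmid : l + PySem.Int.floordiv (r - l) 2 = PySem.Int.floordiv (l + r) 2 := by
        rw [hdA, hdB]; omega
      rw [root0Go]
      simp only [hc, dite_false, hmid]
      rw [show m + 1 + k = (m + k) + 1 from by omega, Function.iterate_succ_apply]
      unfold root0Step
      simp only
      split
      · exact ih k l (PySem.Int.floordiv (l + r) 2) (by rw [hdA]; omega)
          (by rw [hdA]; omega)
      · exact ih k (PySem.Int.floordiv (l + r) 2) r (by rw [hdA]; omega)
          (by rw [hdA]; omega)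

-- ===== VERDICT (by name: the statement is the Claim_ definition above) =====
theorem root0_spec : Claim_equal_root0 := by
  intro a _ hpre
  obtain ⟨hne, hlen⟩ := hpre
  show root0 a = root0_alt a
  have hA : root0 a
      = root0Ret ((List.range 1000000).foldl (fun s _ => root0Step a s)
          (0, (a.length : Int) - 1)) := rfl
  have hB : root0_alt a = root0Go a 0 ((a.length : Int) - 1) := rfl
  rw [hA, hB, foldl_const_iterate, List.length_range,
      show (1000000 : Nat) = 63 + 999937 from by norm_num]
  have hlen1 : 1 ≤ a.length := List.length_pos_iff.mpr hne
  apply iterate_step_eq_go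
  · have : (1:Int) ≤ (a.length : Int) := by exact_mod_cast hlen1
    omega
  · have : (a.length : Int) ≤ 9223372036854775808 := by exact_mod_cast hlen
    norm_num
    omega
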